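-- pv_equiv track=rewrite | github.com/emkk/police-contracts-viz | dataUtility.py | dataByState
-- ===== SOURCE A (Python) =====
-- def dataByState(data):
--     new = {}
--     for item in data:
--         state = item['City/State']
--         state = state.strip()
--         sign = new.get(state, None)
--         if sign is None:
--             new[state] = [item]
--         else:
--             sign.append(item)
--             new[state] = sign
--     return new
-- ===== SOURCE B (Python) =====
-- def dataByState(data):
--     # Two-pass grouping: collect distinct stripped keys in first-appearance
--     # order, then build each group by filtering the input once per key.
--     keys = []
--     for item in data:
--         k = item['City/State'].strip()
--         if k not in keys:
--             keys.append(k)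
--     return {k: [it for it in data if it['City/State'].strip() == k] for k in keys}
-- ===== Notes on version B (the rewrite author's own statement) =====
-- stated objective: alternative
-- what changed: Replaces the single-pass dict-accumulation (lookup, append, reassign) with a two-pass scheme: one pass collecting distinct stripped keys in first-appearance order, then one filter pass of the whole input per key via a dict comprehension.
import Mathlib
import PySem

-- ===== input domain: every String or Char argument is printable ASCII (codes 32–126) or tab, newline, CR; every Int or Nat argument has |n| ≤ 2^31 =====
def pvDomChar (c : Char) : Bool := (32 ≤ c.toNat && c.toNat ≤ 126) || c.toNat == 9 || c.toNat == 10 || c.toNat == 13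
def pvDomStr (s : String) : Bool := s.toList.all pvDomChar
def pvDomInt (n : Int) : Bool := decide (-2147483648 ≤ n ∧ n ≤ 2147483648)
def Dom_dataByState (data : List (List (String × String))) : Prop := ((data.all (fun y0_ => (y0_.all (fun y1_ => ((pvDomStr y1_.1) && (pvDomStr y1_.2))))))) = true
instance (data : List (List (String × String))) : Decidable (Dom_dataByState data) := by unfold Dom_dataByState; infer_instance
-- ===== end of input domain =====

-- B is an alternative two-pass grouping (distinct keys, then a filter per key); equal to A on all inputs where A returns.
-- item['City/State'].strip(); the KeyError case (missing key) is excluded by Pre_, where the port takes "" as default.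
def pvKey (item : List (String × String)) : String :=
  PySem.Str.strip ((PySem.Dict.mk item).getD "City/State" "")

-- ===== PORT A =====
def dataByState (data : List (List (String × String))) : List (String × List (List (String × String))) :=
  (data.foldl (fun new item =>
      let state := pvKey item
      match new.get? state with
      | none => new.insert state [item]
      | some sign => new.insert state (sign ++ [item]))
    PySem.Dict.empty).items

-- ===== PORT B =====
def dataByState_alt (data : List (List (String × String))) : List (String × List (List (String × String))) :=
  let keys := data.foldl (fun ks item => if ks.contains (pvKey item) then ks else ks ++ [pvKey item]) []
  keys.map (fun k => (k, data.filter (fun it => pvKey it == k)))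

-- ===== PRECONDITION & SPEC =====
-- Pre_ excludes exactly the inputs where Python A raises KeyError (an item without the 'City/State' key).
def Pre_dataByState (data : List (List (String × String))) : Prop :=
  (data.all (fun item => (PySem.Dict.mk item).contains "City/State")) = true
instance (data : List (List (String × String))) : Decidable (Pre_dataByState data) := by unfold Pre_dataByState; infer_instance
def pvWitness_dataByState : (List (List (String × String))) :=
  [[("City/State", " CA "), ("v", "1")], [("City/State", "CA")], [("City/State", "NY")]]

def Spec_dataByState (data : List (List (String × String))) (out : List (String × List (List (String × String)))) : Prop := out = dataByState_alt data
instance (data : List (List (String × String))) (out : List (String × List (List (String × String)))) : Decidable (Spec_dataByState data out) := by unfold Spec_dataByState; infer_instance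

-- ===== CLAIM (what is proved, stated in full; the proofs are below) =====
def Claim_equal_dataByState : Prop := ∀ (data : List (List (String × String))), Dom_dataByState data → Pre_dataByState data → Spec_dataByState data (dataByState data)

-- ===== LEMMAS AND PROOFS =====

theorem pv_step_eq (d : PySem.Dict String (List (List (String × String)))) (item : List (String × String)) :
    (match d.get? (pvKey item) with
      | none => d.insert (pvKey item) [item]
      | some sign => d.insert (pvKey item) (sign ++ [item]))
    = d.modify (pvKey item) [] (· ++ [item]) := by
  cases h : d.get? (pvKey item) <;>
    simp [PySem.Dict.modify, PySem.Dict.getD_eq_get?_getD, h]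

theorem pv_fold_eq (data : List (List (String × String))) :
    data.foldl (fun new item =>
      match new.get? (pvKey item) with
      | none => new.insert (pvKey item) [item]
      | some sign => new.insert (pvKey item) (sign ++ [item])) PySem.Dict.empty
    = data.foldl (fun d item => d.modify (pvKey item) [] (· ++ [item])) PySem.Dict.empty :=
  PySem.List.foldl_congr_mem _ _ _ _ (fun d item _ => pv_step_eq d item)

theorem pv_keysB (data : List (List (String × String))) :
    data.foldl (fun ks item => if ks.contains (pvKey item) then ks else ks ++ [pvKey item]) []
    = PySem.Set.ofList (data.map pvKey) := by
  rw [PySem.Set.ofList_eq_foldl, List.foldl_map]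
  simp [PySem.Set.add]

theorem pv_getD (data : List (List (String × String))) (c : String) :
    (data.foldl (fun d item => d.modify (pvKey item) [] (· ++ [item])) PySem.Dict.empty).getD c []
    = data.filter (fun it => pvKey it == c) := by
  have h := PySem.Dict.getD_foldl_modify_append (data.map (fun it => (pvKey it, it)))
      (PySem.Dict.empty) c
  rw [List.foldl_map] at h
  simpa [List.filter_map, Function.comp_def] using h

theorem pv_main (data : List (List (String × String))) :
    dataByState data = dataByState_alt data := by
  unfold dataByState dataByState_alt
  rw [pv_fold_eq, pv_keysB]
  have hnd : (data.foldl (fun d item => d.modify (pvKey item) [] (· ++ [item])) PySem.Dict.empty).keys.Nodup :=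
    PySem.Dict.nodup_keys_foldl_modify_key data pvKey [] (fun _ item v => v ++ [item]) _ (by simp)
  rw [PySem.Dict.items_eq_map_keys _ hnd []]
  rw [PySem.Dict.keys_foldl_modify_key data pvKey [] (fun _ item v => v ++ [item])]
  have hu : PySem.Set.update (PySem.Dict.empty : PySem.Dict String (List (List (String × String)))).keys (data.map pvKey)
      = PySem.Set.ofList (data.map pvKey) := by
    simp [PySem.Set.update, PySem.Set.ofList_eq_foldl, PySem.Dict.keys_empty]
  rw [hu]
  refine List.map_congr_left fun k _ => ?_
  rw [pv_getD]

-- ===== VERDICT (by name: the statement is the Claim_ definition above) =====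
theorem dataByState_spec : Claim_equal_dataByState := by
  intro data _ _
  exact pv_main data
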